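-- pv_equiv track=rewrite | github.com/iyogaa/Clicknget | Alltran.py | _name_token_overlap
-- ===== SOURCE A (Python) =====
-- def _name_token_overlap(m_tokens, l_tokens):
--     if not m_tokens or not l_tokens:
--         return 0
--     m_set = set(m_tokens)
--     l_set = set(l_tokens)
--     exact = len(m_set & l_set)
--     initials = 0
--     for mt in m_set:
--         for lt in l_set:
--             if mt and lt and mt[0] == lt[0]:
--                 initials += 1
--     contain = 0
--     for mt in m_set:
--         for lt in l_set:
--             if mt in lt or lt in mt:
--                 contain += 1
--     return max(exact, initials, contain)
-- ===== SOURCE B (Python) =====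
-- def _name_token_overlap(m_tokens, l_tokens):
--     m_set = set(m_tokens)
--     l_set = set(l_tokens)
--     # count of cross pairs sharing a first character, by grouping l_set's
--     # first characters once instead of scanning all pairs
--     cl = {}
--     for lt in l_set:
--         if lt:
--             c = lt[0]
--             cl[c] = cl.get(c, 0) + 1
--     initials = sum(cl.get(mt[0], 0) for mt in m_set if mt)
--     # exact matches are a subset of containment pairs (t in t), so
--     # max(exact, initials, contain) == max(initials, contain)
--     contain = sum(sum(1 for lt in l_set if mt in lt or lt in mt) for mt in m_set)
--     return max(initials, contain)
-- ===== Notes on version B (the rewrite author's own statement) =====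
-- stated objective: alternative
-- what changed: B drops the exact term entirely (every common token t yields the containment pair (t,t), so exact <= contain and max(exact,initials,contain) = max(initials,contain)), replaces the initials double loop by a one-pass first-character counter over l_set looked up per m_set token, and needs no empty-list guard.
import Mathlib
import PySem

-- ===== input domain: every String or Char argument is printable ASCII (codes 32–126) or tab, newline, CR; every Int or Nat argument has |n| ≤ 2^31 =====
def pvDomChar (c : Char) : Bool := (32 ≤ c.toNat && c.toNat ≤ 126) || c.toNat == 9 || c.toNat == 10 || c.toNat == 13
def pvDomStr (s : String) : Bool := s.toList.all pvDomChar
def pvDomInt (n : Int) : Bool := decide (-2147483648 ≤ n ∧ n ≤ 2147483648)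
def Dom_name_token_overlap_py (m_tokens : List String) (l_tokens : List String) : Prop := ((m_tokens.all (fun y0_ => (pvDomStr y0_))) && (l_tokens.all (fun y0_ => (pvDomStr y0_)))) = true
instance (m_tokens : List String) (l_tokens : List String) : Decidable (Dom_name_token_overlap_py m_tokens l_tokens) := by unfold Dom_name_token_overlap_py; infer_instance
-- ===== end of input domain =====

-- B drops the redundant `exact` term (every common token t gives the containment pair (t,t),
-- so exact ≤ contain), and computes `initials` with a one-pass first-character counter over
-- l_set instead of the all-pairs double loop; same overall cost (contain still dominates).

-- ===== PORT A =====
def name_token_overlap_py (m_tokens : List String) (l_tokens : List String) : Int :=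
  if m_tokens = [] ∨ l_tokens = [] then 0
  else
    let m_set : PySem.Set String := PySem.Set.ofList m_tokens
    let l_set : PySem.Set String := PySem.Set.ofList l_tokens
    let exact : Int := (PySem.Set.inter m_set l_set).length
    let initials : Int := m_set.foldl (fun acc mt =>
      l_set.foldl (fun acc lt =>
        if (mt != "") && (lt != "") && (PySem.Str.pyGet? mt 0 == PySem.Str.pyGet? lt 0)
        then acc + 1 else acc) acc) 0
    let contain : Int := m_set.foldl (fun acc mt =>
      l_set.foldl (fun acc lt =>
        if PySem.Str.isIn mt lt || PySem.Str.isIn lt mt then acc + 1 else acc) acc) 0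
    max exact (max initials contain)

-- ===== PORT B =====
def name_token_overlap_py_alt (m_tokens : List String) (l_tokens : List String) : Int :=
  let m_set : PySem.Set String := PySem.Set.ofList m_tokens
  let l_set : PySem.Set String := PySem.Set.ofList l_tokens
  let cl : PySem.Dict (Option Char) Int := l_set.foldl (fun d lt =>
      if lt != "" then d.insert (PySem.Str.pyGet? lt 0) (d.getD (PySem.Str.pyGet? lt 0) 0 + 1) else d)
    PySem.Dict.empty
  let initials : Int := m_set.foldl (fun acc mt =>
      if mt != "" then acc + cl.getD (PySem.Str.pyGet? mt 0) 0 else acc) 0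
  let contain : Int := m_set.foldl (fun acc mt =>
      acc + (l_set.countP (fun lt => PySem.Str.isIn mt lt || PySem.Str.isIn lt mt) : Int)) 0
  max initials contain

-- ===== PRECONDITION & SPEC =====
def Spec_name_token_overlap_py (m_tokens : List String) (l_tokens : List String) (out : Int) : Prop := out = name_token_overlap_py_alt m_tokens l_tokens
instance (m_tokens : List String) (l_tokens : List String) (out : Int) : Decidable (Spec_name_token_overlap_py m_tokens l_tokens out) := by unfold Spec_name_token_overlap_py; infer_instance

-- ===== CLAIM (what is proved, stated in full; the proofs are below) =====
def Claim_equal_name_token_overlap_py : Prop := ∀ (m_tokens : List String) (l_tokens : List String), Dom_name_token_overlap_py m_tokens l_tokens → Spec_name_token_overlap_py m_tokens l_tokens (name_token_overlap_py m_tokens l_tokens)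

-- ===== LEMMAS AND PROOFS =====

-- a nested counting double loop is a fold of per-row countP sums
theorem pv_nested_count (M L : List String) (p : String → String → Bool) (a : Int) :
    M.foldl (fun acc mt => L.foldl (fun acc lt => if p mt lt then acc + 1 else acc) acc) a
      = M.foldl (fun acc mt => acc + (L.countP (p mt) : Int)) a := by
  refine PySem.List.foldl_congr_mem' M _ _ a (fun mt _ acc => ?_)
  exact PySem.List.foldl_if_add_one (p mt) L acc

theorem pv_beq_comm (a b : Option Char) : (a == b) = (b == a) := by
  cases h1 : a == b <;> cases h2 : b == a <;> simp_all [beq_iff_eq]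

-- the first-character counter over L read back at key k
theorem pv_counter_getD (L : List String) (k : Option Char) :
    (L.foldl (fun d lt =>
        if lt != "" then d.insert (PySem.Str.pyGet? lt 0) (d.getD (PySem.Str.pyGet? lt 0) 0 + 1) else d)
      PySem.Dict.empty).getD k 0
      = (L.countP (fun lt => (lt != "") && (PySem.Str.pyGet? lt 0 == k)) : Int) := by
  rw [← List.foldl_filter
      (f := fun (d : PySem.Dict (Option Char) Int) (lt : String) =>
        d.insert (PySem.Str.pyGet? lt 0) (d.getD (PySem.Str.pyGet? lt 0) 0 + 1))
      (p := fun lt => lt != "")]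
  rw [← List.foldl_map (f := fun lt => PySem.Str.pyGet? lt 0)
      (g := fun (d : PySem.Dict (Option Char) Int) (x : Option Char) => d.insert x (d.getD x 0 + 1))]
  rw [PySem.Dict.getD_foldl_insert_add_one, PySem.Dict.getD_empty, zero_add,
    List.count_eq_countP, List.countP_map, List.countP_filter]
  norm_cast
  refine List.countP_congr (fun lt _ => ?_)
  simp only [Function.comp]
  rw [Bool.and_comm]

-- mt in mt holds, so a common token contributes a containment pair
theorem pv_isIn_self (cs : List Char) : PySem.Chars.isIn cs cs = true :=
  (PySem.Chars.isIn_iff_infix cs cs).mpr List.infix_rfl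

theorem name_token_overlap_py_spec : Claim_equal_name_token_overlap_py := by
  intro m l _
  unfold Spec_name_token_overlap_py name_token_overlap_py name_token_overlap_py_alt
  by_cases hml : m = [] ∨ l = []
  · simp only [hml, if_true]
    rcases hml with h | h
    · subst h
      simp [PySem.Set.ofList]
    · subst h
      have hfold0 : ∀ (M : List String) (g : String → Int),
          M.foldl (fun acc mt => if mt != "" then acc + (0:Int) else acc) 0 = 0 := by
        intro M g
        rw [PySem.List.foldl_congr_mem' M _ (fun acc _ => acc) 0 (by intro x _ acc; split <;> simp)]
        induction M with
        | nil => rfl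
        | cons x xs ih => simp [ih]
      simp only [PySem.Set.ofList, List.foldl_nil]
      rw [PySem.List.foldl_congr_mem' _ _ (fun acc mt => if mt != "" then acc + (0:Int) else acc) 0
            (by intro mt _ acc; simp [PySem.Dict.getD_empty]),
          hfold0 _ (fun _ => 0)]
      rw [PySem.List.foldl_congr_mem' _ _ (fun acc _ => acc + (0:Int)) 0 (by intro mt _ acc; simp)]
      rw [PySem.List.foldl_add]
      simp
  · simp only [hml, if_false]
    set M : List String := PySem.Set.ofList m with hM
    set L : List String := PySem.Set.ofList l with hL
    -- initials agree
    have hinit :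
        M.foldl (fun acc mt => L.foldl (fun acc lt =>
            if (mt != "") && (lt != "") && (PySem.Str.pyGet? mt 0 == PySem.Str.pyGet? lt 0)
            then acc + 1 else acc) acc) (0:Int)
          = M.foldl (fun acc mt =>
              if mt != "" then
                acc + (L.foldl (fun d lt =>
                    if lt != "" then d.insert (PySem.Str.pyGet? lt 0) (d.getD (PySem.Str.pyGet? lt 0) 0 + 1) else d)
                  PySem.Dict.empty).getD (PySem.Str.pyGet? mt 0) 0
              else acc) (0:Int) := by
      rw [pv_nested_count]
      refine PySem.List.foldl_congr_mem' M _ _ 0 (fun mt _ acc => ?_)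
      by_cases hmt : mt = ""
      · subst hmt
        simp
      · have hmt' : (mt != "") = true := by simp [hmt]
        rw [pv_counter_getD L (PySem.Str.pyGet? mt 0), if_pos hmt']
        congr 2
        refine List.countP_congr (fun lt _ => ?_)
        simp only [hmt', Bool.true_and]
        rw [pv_beq_comm]
    -- contain agrees
    have hcont :
        M.foldl (fun acc mt => L.foldl (fun acc lt =>
            if PySem.Str.isIn mt lt || PySem.Str.isIn lt mt then acc + 1 else acc) acc) (0:Int)
          = M.foldl (fun acc mt =>
              acc + (L.countP (fun lt => PySem.Str.isIn mt lt || PySem.Str.isIn lt mt) : Int)) (0:Int) :=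
      pv_nested_count M L _ 0
    -- exact ≤ contain
    have hexact :
        ((PySem.Set.inter M L).length : Int)
          ≤ M.foldl (fun acc mt =>
              acc + (L.countP (fun lt => PySem.Str.isIn mt lt || PySem.Str.isIn lt mt) : Int)) 0 := by
      rw [PySem.List.foldl_add]
      have h1 : ((PySem.Set.inter M L).length : Int)
          = (M.map (fun mt => if L.contains mt then (1:Int) else 0)).sum := by
        rw [PySem.List.sum_map_ite_one_zero]
        simp only [PySem.Set.inter, List.countP_eq_length_filter]
        simp [PySem.Set.contains_eq_listContains]
        congr 1
        refine List.filter_congr (fun x _ => ?_)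
        simp
      rw [h1]
      have h2 : ∀ mt ∈ M, (if L.contains mt then (1:Int) else 0)
          ≤ (L.countP (fun lt => PySem.Str.isIn mt lt || PySem.Str.isIn lt mt) : Int) := by
        intro mt _
        by_cases hm : L.contains mt
        · simp only [hm, if_true]
          have : 0 < L.countP (fun lt => PySem.Str.isIn mt lt || PySem.Str.isIn lt mt) := by
            rw [List.countP_pos_iff]
            exact ⟨mt, List.contains_iff_mem.mp hm, by simp [pv_isIn_self]⟩
          omega
        · simp only [hm]
          positivity
      simpa using List.sum_le_sum h2
    simp only [hinit, hcont]
    exact max_eq_right (le_trans hexact (le_max_right _ _))
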